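-- pv_equiv track=rewrite | github.com/aorta96/Climate-C-Index | scripts/compile_infrastructure_dataset.py | assign_tier
-- ===== SOURCE A (Python) =====
-- tier_1 = {
--     "Paraguay": "PRY",
--     "El Salvador": "SLV",
--     "Nicaragua": "NIC",
--     "Serbia": "SRB",
--     "Bulgaria": "BGR",
--     "Lao PDR": "LAO",
--     "Lebanon": "LBN",
--     "Kyrgyz Republic": "KGZ"
-- }
--
-- tier_2 = {
--     "Peru": "PER",
--     "Malaysia": "MYS",
--     "Ghana": "GHA",
--     "Mozambique": "MOZ",
--     "Angola": "AGO",
--     "Nepal": "NPL",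
--     "Venezuela, RB": "VEN",
--     "Zambia": "ZMB",
--     "Sri Lanka": "LKA",
--     "Mali": "MLI"
-- }
--
-- tier_3 = {
--     "Argentina": "ARG",
--     "Algeria": "DZA",
--     "Iraq": "IRQ",
--     "Morocco": "MAR",
--     "Kenya": "KEN",
--     "South Africa": "ZAF",
--     "Myanmar": "MMR",
--     "Colombia": "COL",
--     "Uzbekistan": "UZB"
-- }
--
-- tier_4 = {
--     "Egypt, Arab Rep.": "EGY",
--     "Ethiopia": "ETH",
--     "Philippines": "PHL",
--     "Vietnam": "VNM",
--     "Iran, Islamic Rep.": "IRN",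
--     "Turkey": "TUR"
-- }
--
-- def assign_tier(country_code):
--     for name, code in tier_1.items():
--         if code == country_code:
--             return 'Tier 1'
--     for name, code in tier_2.items():
--         if code == country_code:
--             return 'Tier 2'
--     for name, code in tier_3.items():
--         if code == country_code:
--             return 'Tier 3'
--     for name, code in tier_4.items():
--         if code == country_code:
--             return 'Tier 4'
--     return 'Unknown'
-- ===== SOURCE B (Python) =====
-- # Single flat lookup table code -> tier label, written out once; the function is one dict .get.
-- TIER_OF_CODE = {
--     "PRY": "Tier 1", "SLV": "Tier 1", "NIC": "Tier 1", "SRB": "Tier 1",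
--     "BGR": "Tier 1", "LAO": "Tier 1", "LBN": "Tier 1", "KGZ": "Tier 1",
--     "PER": "Tier 2", "MYS": "Tier 2", "GHA": "Tier 2", "MOZ": "Tier 2",
--     "AGO": "Tier 2", "NPL": "Tier 2", "VEN": "Tier 2", "ZMB": "Tier 2",
--     "LKA": "Tier 2", "MLI": "Tier 2",
--     "ARG": "Tier 3", "DZA": "Tier 3", "IRQ": "Tier 3", "MAR": "Tier 3",
--     "KEN": "Tier 3", "ZAF": "Tier 3", "MMR": "Tier 3", "COL": "Tier 3",
--     "UZB": "Tier 3",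
--     "EGY": "Tier 4", "ETH": "Tier 4", "PHL": "Tier 4", "VNM": "Tier 4",
--     "IRN": "Tier 4", "TUR": "Tier 4",
-- }
--
-- def assign_tier(country_code):
--     return TIER_OF_CODE.get(country_code, 'Unknown')
-- ===== Notes on version B (the rewrite author's own statement) =====
-- stated objective: simpler
-- what changed: Replaced the four name->code dicts and their four sequential value-scanning loops with one flat literal code->tier table, so the body is a single dict lookup with a default.
import Mathlib
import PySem

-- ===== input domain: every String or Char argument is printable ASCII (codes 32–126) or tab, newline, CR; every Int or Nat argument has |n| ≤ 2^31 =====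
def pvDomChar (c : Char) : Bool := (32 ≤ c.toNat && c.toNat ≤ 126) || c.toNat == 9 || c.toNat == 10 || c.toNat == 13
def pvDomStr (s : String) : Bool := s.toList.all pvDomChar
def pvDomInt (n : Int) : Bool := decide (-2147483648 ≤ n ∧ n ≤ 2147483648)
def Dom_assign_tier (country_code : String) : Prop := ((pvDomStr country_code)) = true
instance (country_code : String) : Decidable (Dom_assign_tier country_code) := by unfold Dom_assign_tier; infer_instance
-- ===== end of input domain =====

-- B replaces A's four name->code dicts and four sequential value-scanning loops with one flat literal code->tier table and a single lookup with default; objective: simpler.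


-- ===== PORT A =====
-- the four tier dicts of the module, as insertion-ordered association lists (name, code)
def pvTier1 : List (String × String) :=
  [("Paraguay", "PRY"), ("El Salvador", "SLV"), ("Nicaragua", "NIC"), ("Serbia", "SRB"),
   ("Bulgaria", "BGR"), ("Lao PDR", "LAO"), ("Lebanon", "LBN"), ("Kyrgyz Republic", "KGZ")]
def pvTier2 : List (String × String) :=
  [("Peru", "PER"), ("Malaysia", "MYS"), ("Ghana", "GHA"), ("Mozambique", "MOZ"),
   ("Angola", "AGO"), ("Nepal", "NPL"), ("Venezuela, RB", "VEN"), ("Zambia", "ZMB"),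
   ("Sri Lanka", "LKA"), ("Mali", "MLI")]
def pvTier3 : List (String × String) :=
  [("Argentina", "ARG"), ("Algeria", "DZA"), ("Iraq", "IRQ"), ("Morocco", "MAR"),
   ("Kenya", "KEN"), ("South Africa", "ZAF"), ("Myanmar", "MMR"), ("Colombia", "COL"),
   ("Uzbekistan", "UZB")]
def pvTier4 : List (String × String) :=
  [("Egypt, Arab Rep.", "EGY"), ("Ethiopia", "ETH"), ("Philippines", "PHL"),
   ("Vietnam", "VNM"), ("Iran, Islamic Rep.", "IRN"), ("Turkey", "TUR")]

-- A's 'for name, code in tier.items(): if code == country_code: return label' loop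
def pvScanTier (cc label : String) : List (String × String) → Option String
  | [] => none
  | (_, code) :: rest => if code == cc then some label else pvScanTier cc label rest

def assign_tier (country_code : String) : String :=
  match pvScanTier country_code "Tier 1" pvTier1 with
  | some r => r
  | none =>
    match pvScanTier country_code "Tier 2" pvTier2 with
    | some r => r
    | none =>
      match pvScanTier country_code "Tier 3" pvTier3 with
      | some r => r
      | none =>
        match pvScanTier country_code "Tier 4" pvTier4 with
        | some r => r
        | none => "Unknown"

-- ===== PORT B =====
-- B's flat literal table TIER_OF_CODE : code -> tier label (33 distinct keys)
def pvTierOfCode : PySem.Dict String String :=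
  PySem.Dict.mk
    [("PRY", "Tier 1"), ("SLV", "Tier 1"), ("NIC", "Tier 1"), ("SRB", "Tier 1"),
     ("BGR", "Tier 1"), ("LAO", "Tier 1"), ("LBN", "Tier 1"), ("KGZ", "Tier 1"),
     ("PER", "Tier 2"), ("MYS", "Tier 2"), ("GHA", "Tier 2"), ("MOZ", "Tier 2"),
     ("AGO", "Tier 2"), ("NPL", "Tier 2"), ("VEN", "Tier 2"), ("ZMB", "Tier 2"),
     ("LKA", "Tier 2"), ("MLI", "Tier 2"),
     ("ARG", "Tier 3"), ("DZA", "Tier 3"), ("IRQ", "Tier 3"), ("MAR", "Tier 3"),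
     ("KEN", "Tier 3"), ("ZAF", "Tier 3"), ("MMR", "Tier 3"), ("COL", "Tier 3"),
     ("UZB", "Tier 3"),
     ("EGY", "Tier 4"), ("ETH", "Tier 4"), ("PHL", "Tier 4"), ("VNM", "Tier 4"),
     ("IRN", "Tier 4"), ("TUR", "Tier 4")]

def assign_tier_alt (country_code : String) : String :=
  PySem.Dict.getD pvTierOfCode country_code "Unknown"

-- ===== PRECONDITION & SPEC =====
def Spec_assign_tier (country_code : String) (out : String) : Prop := out = assign_tier_alt country_code
instance (country_code : String) (out : String) : Decidable (Spec_assign_tier country_code out) := by unfold Spec_assign_tier; infer_instance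

-- ===== CLAIM (what is proved, stated in full; the proofs are below) =====
def Claim_equal_assign_tier : Prop := ∀ (country_code : String), Dom_assign_tier country_code → Spec_assign_tier country_code (assign_tier country_code)

-- ===== LEMMAS AND PROOFS =====

-- A's scan of a tier equals lookup in that tier's (code, label) reverse fragment
theorem pvScan_eq_get (cc label : String) (d : List (String × String)) :
    pvScanTier cc label d = (PySem.Dict.mk (d.map (fun p => (p.2, label)))).get? cc := by
  induction d with
  | nil => simp [pvScanTier, PySem.Dict.get?]
  | cons p rest ih =>
    obtain ⟨n, c⟩ := p
    simp [pvScanTier, PySem.Dict.get?_mk_cons, ih]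

-- lookup in a concatenated literal dict = first lookup, else second
theorem pvGet_mk_append (l₁ l₂ : List (String × String)) (cc : String) :
    (PySem.Dict.mk (l₁ ++ l₂)).get? cc =
      ((PySem.Dict.mk l₁).get? cc).or ((PySem.Dict.mk l₂).get? cc) := by
  induction l₁ with
  | nil => simp [PySem.Dict.get?]
  | cons p rest ih =>
    obtain ⟨k, v⟩ := p
    by_cases h : k == cc
    · simp [PySem.Dict.get?_mk_cons, h]
    · simp [PySem.Dict.get?_mk_cons, h, ih]

-- B's flat literal table is (definitionally) the concatenation of the four tiers' reverse fragments
theorem pvFlat_eq :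
    pvTierOfCode =
      PySem.Dict.mk
        (pvTier1.map (fun p => (p.2, "Tier 1")) ++ pvTier2.map (fun p => (p.2, "Tier 2")) ++
         pvTier3.map (fun p => (p.2, "Tier 3")) ++ pvTier4.map (fun p => (p.2, "Tier 4"))) := rfl

-- ===== VERDICT (by name: the statement is the Claim_ definition above) =====
theorem assign_tier_spec : Claim_equal_assign_tier := by
  intro cc _
  unfold Spec_assign_tier assign_tier assign_tier_alt
  rw [pvFlat_eq, PySem.Dict.getD_eq_get?_getD, pvGet_mk_append, pvGet_mk_append, pvGet_mk_append]
  rw [pvScan_eq_get cc "Tier 1" pvTier1, pvScan_eq_get cc "Tier 2" pvTier2,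
      pvScan_eq_get cc "Tier 3" pvTier3, pvScan_eq_get cc "Tier 4" pvTier4]
  cases (PySem.Dict.mk (pvTier1.map (fun p => (p.2, "Tier 1")))).get? cc <;>
  cases (PySem.Dict.mk (pvTier2.map (fun p => (p.2, "Tier 2")))).get? cc <;>
  cases (PySem.Dict.mk (pvTier3.map (fun p => (p.2, "Tier 3")))).get? cc <;>
  cases (PySem.Dict.mk (pvTier4.map (fun p => (p.2, "Tier 4")))).get? cc <;>
  simp [Option.or, Option.getD]
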